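-- pv_equiv track=rewrite | github.com/MarkusBertram/Cross-Dataset-Generalization-of-German-Hate-Speech-Datasets | dataset-word-embedding-similarity.py | encode_labels
-- ===== SOURCE A (Python) =====
-- def encode_labels(y_labels):
--     encoding = dict()
--     max_label = 0
--     y_encoded = list()
--     for entry in y_labels:
--         if entry not in encoding:
--             encoding[entry] = max_label
--             max_label += 1
--         y_encoded.append(encoding[entry])
--     return y_encoded, encoding
-- ===== SOURCE B (Python) =====
-- def encode_labels(y_labels):
--     first = {label: i for i, label in reversed(list(enumerate(y_labels)))}
--     uniq = sorted(first, key=first.get)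
--     encoding = {label: rank for rank, label in enumerate(uniq)}
--     return [encoding[label] for label in y_labels], encoding
-- ===== Notes on version B (the rewrite author's own statement) =====
-- stated objective: alternative
-- what changed: Replaces A's single fused conditional-insert loop with a sort-based ranking: a blind reversed-overwrite comprehension records each label's first-occurrence position, the labels are sorted by that position to recover first-seen order, and ranks are assigned by enumerate over the sorted labels.
import Mathlib
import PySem

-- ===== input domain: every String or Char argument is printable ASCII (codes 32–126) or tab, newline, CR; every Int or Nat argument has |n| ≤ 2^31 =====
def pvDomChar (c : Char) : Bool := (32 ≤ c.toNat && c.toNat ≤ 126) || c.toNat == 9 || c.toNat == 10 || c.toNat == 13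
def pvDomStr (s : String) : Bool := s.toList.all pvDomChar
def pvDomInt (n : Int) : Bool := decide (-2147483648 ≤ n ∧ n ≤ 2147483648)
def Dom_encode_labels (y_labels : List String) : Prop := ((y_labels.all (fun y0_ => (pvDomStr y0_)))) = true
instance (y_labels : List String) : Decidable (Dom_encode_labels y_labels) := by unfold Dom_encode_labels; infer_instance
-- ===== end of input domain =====

-- B replaces A's fused conditional-insert loop by sort-based ranking: a reversed-overwrite pass records
-- first-occurrence positions, sorting by them recovers first-seen order, and ranks are assigned at the end.

-- ===== PORT A =====
-- one loop iteration of A: conditionally insert the fresh label, then append its code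
def encStep (s : PySem.Dict String Int × Int × List Int) (entry : String) :
    PySem.Dict String Int × Int × List Int :=
  let s' := if s.1.contains entry then s else (s.1.insert entry s.2.1, s.2.1 + 1, s.2.2)
  (s'.1, s'.2.1, s'.2.2 ++ [s'.1.getD entry 0])

def encode_labels (y_labels : List String) : List Int × (List (String × Int)) :=
  let st := y_labels.foldl encStep (PySem.Dict.empty, 0, [])
  (st.2.2, st.1.items)

-- ===== PORT B =====
-- first = {label: i for i, label in reversed(list(enumerate(y_labels)))}
def firstPos (y : List String) : PySem.Dict String Int :=
  ((PySem.List.enumerate y).reverse).foldl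
    (fun (d : PySem.Dict String Int) p => d.insert p.2 p.1) PySem.Dict.empty

-- encoding = {label: rank for rank, label in enumerate(uniq)}
def rankOf (uniq : List String) : PySem.Dict String Int :=
  (PySem.List.enumerate uniq).foldl
    (fun (d : PySem.Dict String Int) p => d.insert p.2 p.1) PySem.Dict.empty

-- sorted(first, key=first.get) sorts the keys, on which first.get is always some value: ported with getD 0
def encode_labels_alt (y_labels : List String) : List Int × (List (String × Int)) :=
  let first := firstPos y_labels
  let uniq := PySem.List.sorted first.keys (fun e => first.getD e 0) false
  let encoding := rankOf uniq
  (y_labels.map (fun e => encoding.getD e 0), encoding.items)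

-- ===== PRECONDITION & SPEC =====
def Spec_encode_labels (y_labels : List String) (out : List Int × (List (String × Int))) : Prop := out = encode_labels_alt y_labels
instance (y_labels : List String) (out : List Int × (List (String × Int))) : Decidable (Spec_encode_labels y_labels out) := by unfold Spec_encode_labels; infer_instance

-- ===== CLAIM (what is proved, stated in full; the proofs are below) =====
def Claim_equal_encode_labels : Prop := ∀ (y_labels : List String), Dom_encode_labels y_labels → Spec_encode_labels y_labels (encode_labels y_labels)

-- ===== LEMMAS AND PROOFS =====

-- the dict whose items are (label, position) over a duplicate-free label list u
def Denc (u : List String) : PySem.Dict String Int :=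
  PySem.Dict.mk ((PySem.List.enumerate u).map (fun p => (p.2, p.1)))

theorem get?_Denc_aux (u : List String) (s : Int) (e : String) :
    (PySem.Dict.mk ((PySem.List.enumerate u s).map (fun p => (p.2, p.1)))).get? e
      = (PySem.List.index? u e).map (fun n => s + (n : Int)) := by
  induction u generalizing s with
  | nil => simp [PySem.List.enumerate_nil, PySem.Dict.get?, PySem.List.index?_eq_idxOf?, List.idxOf?]
  | cons x t ih =>
    rw [PySem.List.enumerate_cons]
    by_cases hx : x = e
    · subst hx
      rw [PySem.List.index?_cons_self]
      simp [PySem.Dict.get?_mk_cons]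
    · rw [PySem.List.index?_cons_of_ne t hx]
      simp only [List.map_cons, PySem.Dict.get?_mk_cons, beq_iff_eq, if_neg hx, ih (s + 1)]
      cases PySem.List.index? t e with
      | none => rfl
      | some n => simp; ring

theorem get?_Denc (u : List String) (e : String) :
    (Denc u).get? e = (PySem.List.index? u e).map (fun n => (n : Int)) := by
  simpa using get?_Denc_aux u 0 e

theorem contains_Denc (u : List String) (e : String) :
    (Denc u).contains e = decide (e ∈ u) := by
  rw [PySem.Dict.contains_eq_isSome_get?, get?_Denc]
  by_cases h : e ∈ u
  · obtain ⟨k, hk⟩ := Option.isSome_iff_exists.mp ((PySem.List.index?_isSome_iff u e).mpr h)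
    rw [hk]
    simp [h]
  · rw [(PySem.List.index?_eq_none_iff u e).mpr h]
    simp [h]

theorem getD_Denc_of_mem (u : List String) (e : String) (k : Nat)
    (hk : PySem.List.index? u e = some k) : (Denc u).getD e 0 = (k : Int) := by
  rw [PySem.Dict.getD_eq_get?_getD, get?_Denc, hk]; rfl

theorem A_loop (l : List String) :
    l.foldl encStep (PySem.Dict.empty, 0, []) =
      (Denc (PySem.Set.ofList l), ((PySem.Set.ofList l).length : Int),
        l.map (fun e => (Denc (PySem.Set.ofList l)).getD e 0)) := by
  induction l using List.reverseRecOn with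
  | nil => rfl
  | append_singleton l x ih =>
    rw [List.foldl_append, List.foldl_cons, List.foldl_nil, ih]
    by_cases hx : x ∈ l
    · have hmem : x ∈ PySem.Set.ofList l := by rw [PySem.Set.mem_ofList]; exact hx
      have hu : PySem.Set.ofList (l ++ [x]) = PySem.Set.ofList l := by
        rw [PySem.Set.ofList_append_singleton, PySem.Set.add_of_mem hmem]
      rw [hu]
      have hc : (Denc (PySem.Set.ofList l)).contains x = true := by
        rw [contains_Denc]; simpa using hmem
      simp only [encStep, hc, if_pos, List.map_append, List.map_cons, List.map_nil]
    · have hnm : x ∉ PySem.Set.ofList l := by rw [PySem.Set.mem_ofList]; exact hx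
      have hu : PySem.Set.ofList (l ++ [x]) = PySem.Set.ofList l ++ [x] := by
        rw [PySem.Set.ofList_append_singleton, PySem.Set.add_of_not_mem hnm]
      have hc : (Denc (PySem.Set.ofList l)).contains x = false := by
        rw [contains_Denc]; simpa using hnm
      have hins : (Denc (PySem.Set.ofList l)).insert x ((PySem.Set.ofList l).length : Int)
          = Denc (PySem.Set.ofList l ++ [x]) := by
        apply PySem.Dict.ext
        rw [PySem.Dict.items_insert_of_not_contains _ _ hc]
        show (PySem.List.enumerate (PySem.Set.ofList l)).map (fun p => (p.2, p.1)) ++ _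
          = (PySem.List.enumerate (PySem.Set.ofList l ++ [x])).map (fun p => (p.2, p.1))
        rw [PySem.List.enumerate_append]
        simp [PySem.List.enumerate_cons, PySem.List.enumerate_nil]
      have hpres : ∀ e ∈ l, (Denc (PySem.Set.ofList l ++ [x])).getD e 0
          = (Denc (PySem.Set.ofList l)).getD e 0 := by
        intro e he
        have hmem : e ∈ PySem.Set.ofList l := by rw [PySem.Set.mem_ofList]; exact he
        rw [PySem.Dict.getD_eq_get?_getD, PySem.Dict.getD_eq_get?_getD, get?_Denc, get?_Denc,
          PySem.List.index?_append_of_mem _ hmem]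
      have hnew : (Denc (PySem.Set.ofList l ++ [x])).getD x 0 = ((PySem.Set.ofList l).length : Int) := by
        exact getD_Denc_of_mem _ _ _ (PySem.List.index?_append_singleton_self _ _ hnm)
      rw [hu]
      simp only [encStep, hc, Bool.false_eq_true, if_false, hins]
      refine Prod.ext ?_ (Prod.ext ?_ ?_)
      · rfl
      · simp only [List.length_append, List.length_cons, List.length_nil]
        push_cast; ring
      · rw [List.map_append, List.map_congr_left hpres]
        simp [hnew]

-- the index of any member is a valid position
theorem index?_lt_length (l : List String) (e : String) (k : Nat)
    (hk : PySem.List.index? l e = some k) : k < l.length := by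
  obtain ⟨hlt, -, -⟩ := PySem.List.getElem_of_index?_eq_some hk
  exact hlt

-- the reversed-overwrite insert loop records the FIRST occurrence position of each label
theorem get?_firstPos_aux (y : List String) (s : Int) (e : String) :
    (((PySem.List.enumerate y s).reverse).foldl
        (fun (d : PySem.Dict String Int) p => d.insert p.2 p.1) PySem.Dict.empty).get? e
      = (PySem.List.index? y e).map (fun n => s + (n : Int)) := by
  induction y generalizing s with
  | nil => simp [PySem.List.enumerate_nil, PySem.List.index?_eq_idxOf?, List.idxOf?,
      PySem.Dict.get?_empty]
  | cons x t ih =>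
    rw [PySem.List.enumerate_cons, List.reverse_cons, List.foldl_append, List.foldl_cons,
      List.foldl_nil, PySem.Dict.get?_insert]
    by_cases hx : x = e
    · subst hx
      rw [PySem.List.index?_cons_self, if_pos rfl]
      simp
    · rw [if_neg (fun h => hx h.symm), PySem.List.index?_cons_of_ne t hx, ih (s + 1)]
      cases PySem.List.index? t e with
      | none => rfl
      | some n => simp; ring

theorem getD_firstPos (y : List String) (e : String) (k : Nat)
    (hk : PySem.List.index? y e = some k) : (firstPos y).getD e 0 = (k : Int) := by
  rw [PySem.Dict.getD_eq_get?_getD, firstPos, get?_firstPos_aux, hk]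
  simp

-- the keys of firstPos are the distinct labels in last-seen order
theorem keys_firstPos (y : List String) :
    (firstPos y).keys = PySem.Set.ofList y.reverse := by
  rw [firstPos, PySem.Dict.keys_foldl_insert_key ((PySem.List.enumerate y).reverse)
    (fun p => p.2) (fun d p => p.1) PySem.Dict.empty]
  rw [show (PySem.Dict.empty : PySem.Dict String Int).keys = [] from rfl,
    PySem.Set.update_nil_left, List.map_reverse]
  rw [show ((PySem.List.enumerate y).map fun p => p.2) = y from
    PySem.List.map_snd_enumerate y 0]

-- along set(y) (first-seen order) the first-occurrence index strictly increases
theorem pairwise_index_ofList (y : List String) :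
    (PySem.Set.ofList y).Pairwise
      (fun a b => (PySem.List.index? y a).getD 0 < (PySem.List.index? y b).getD 0) := by
  induction y using List.reverseRecOn with
  | nil => simp [PySem.Set.ofList_nil]
  | append_singleton l x ih =>
    have hidx : ∀ e ∈ PySem.Set.ofList l,
        PySem.List.index? (l ++ [x]) e = PySem.List.index? l e := by
      intro e he
      exact PySem.List.index?_append_of_mem _ ((PySem.Set.mem_ofList l e).mp he)
    by_cases hx : x ∈ l
    · have hu : PySem.Set.ofList (l ++ [x]) = PySem.Set.ofList l := by
        rw [PySem.Set.ofList_append_singleton,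
          PySem.Set.add_of_mem ((PySem.Set.mem_ofList l x).mpr hx)]
      rw [hu]
      exact List.Pairwise.imp_of_mem (fun ha hb h => by rw [hidx _ ha, hidx _ hb]; exact h) ih
    · have hnm : x ∉ PySem.Set.ofList l := by rw [PySem.Set.mem_ofList]; exact hx
      have hu : PySem.Set.ofList (l ++ [x]) = PySem.Set.ofList l ++ [x] := by
        rw [PySem.Set.ofList_append_singleton, PySem.Set.add_of_not_mem hnm]
      rw [hu, List.pairwise_append]
      refine ⟨List.Pairwise.imp_of_mem (fun ha hb h => by rw [hidx _ ha, hidx _ hb]; exact h) ih,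
        List.pairwise_singleton _ _, ?_⟩
      intro a ha b hb
      rw [List.mem_singleton] at hb; subst hb
      rw [hidx _ ha, PySem.List.index?_append_singleton_self _ _ hx]
      have hmem : a ∈ l := (PySem.Set.mem_ofList l a).mp ha
      obtain ⟨k, hk⟩ := Option.isSome_iff_exists.mp
        ((PySem.List.index?_isSome_iff l a).mpr hmem)
      rw [hk]
      simpa using index?_lt_length l a k hk

-- B's sort of the keys by first-occurrence position is exactly set(y) in first-seen order
theorem uniq_eq (y : List String) :
    PySem.List.sorted (firstPos y).keys (fun e => (firstPos y).getD e 0) false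
      = PySem.Set.ofList y := by
  rw [keys_firstPos]
  apply PySem.List.sorted_eq_of_perm_of_pairwise_lt
  · refine (List.perm_ext_iff_of_nodup (PySem.Set.nodup_ofList y)
      (PySem.Set.nodup_ofList y.reverse)).mpr ?_
    intro a
    rw [PySem.Set.mem_ofList, PySem.Set.mem_ofList, List.mem_reverse]
  · refine List.Pairwise.imp_of_mem ?_ (pairwise_index_ofList y)
    intro a b ha hb h
    have hma : a ∈ y := (PySem.Set.mem_ofList y a).mp ha
    have hmb : b ∈ y := (PySem.Set.mem_ofList y b).mp hb
    obtain ⟨ka, hka⟩ := Option.isSome_iff_exists.mp ((PySem.List.index?_isSome_iff y a).mpr hma)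
    obtain ⟨kb, hkb⟩ := Option.isSome_iff_exists.mp ((PySem.List.index?_isSome_iff y b).mpr hmb)
    rw [getD_firstPos y a ka hka, getD_firstPos y b kb hkb]
    rw [hka, hkb] at h
    exact_mod_cast h

-- the rank dict over a duplicate-free label list is Denc
theorem rankOf_eq (u : List String) (hnd : u.Nodup) : rankOf u = Denc u := by
  apply PySem.Dict.ext
  have hfresh : ∀ a ∈ PySem.List.enumerate u 0,
      (PySem.Dict.empty : PySem.Dict String Int).contains a.2 = false := by
    intro a _; rfl
  have hk : ((PySem.List.enumerate u 0).map (fun p => p.2)).Nodup := by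
    rw [PySem.List.map_snd_enumerate]
    exact hnd
  have := PySem.Dict.items_foldl_insert_fresh (l := PySem.List.enumerate u 0)
    (k := fun p => p.2) (v := fun p => p.1) (d := PySem.Dict.empty) hfresh hk
  simpa [rankOf] using this

-- ===== VERDICT (by name: the statement is the Claim_ definition above) =====
theorem encode_labels_spec : Claim_equal_encode_labels := by
  intro y _
  show encode_labels y = encode_labels_alt y
  rw [encode_labels, encode_labels_alt]
  simp only [A_loop, uniq_eq, rankOf_eq _ (PySem.Set.nodup_ofList y)]
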